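-- pv_equiv track=rewrite | github.com/haandol/dojo | practice/sieve.py | solution
-- ===== SOURCE A (Python) =====
-- def solution(n):
--   prime = [True for _ in range(n)]
--
--   for i in range(2, 10):
--     for j in range(2, int(n)):
--       if n <= i * j:
--         break
--       prime[i * j] = False
--
--   result = []
--   for i in range(2, n):
--     if prime[i]:
--       result.append(i)
--
--   return result
-- ===== SOURCE B (Python) =====
-- def solution(n):
--   # Single scan: keep each candidate below n when no small factor divides it with cofactor at least two.
--   return [m for m in range(2, n) if not any(m % i == 0 and m > i for i in range(2, 10))]
-- ===== Notes on version B (the rewrite author's own statement) =====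
-- stated objective: simpler
-- what changed: Replaced the mark-composites-then-scan sieve (boolean array plus nested multiple-marking loops) with a single scan that keeps each candidate exactly when no small factor up to nine divides it with a cofactor of at least two.
import Mathlib
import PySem

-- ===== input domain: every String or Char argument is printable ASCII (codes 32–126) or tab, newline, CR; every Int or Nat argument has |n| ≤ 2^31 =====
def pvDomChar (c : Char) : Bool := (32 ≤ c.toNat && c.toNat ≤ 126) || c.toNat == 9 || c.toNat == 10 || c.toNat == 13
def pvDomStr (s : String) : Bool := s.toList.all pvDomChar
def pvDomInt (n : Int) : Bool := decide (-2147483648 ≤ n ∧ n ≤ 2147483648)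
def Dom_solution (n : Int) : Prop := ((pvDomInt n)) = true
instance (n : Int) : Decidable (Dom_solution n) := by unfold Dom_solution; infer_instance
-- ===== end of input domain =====

-- B replaces A's sieve (mark multiples, then scan) by one scan with a direct divisibility test; objective: simpler.

-- ===== PORT A =====
-- inner 'for j in range(2, int(n)): if n <= i*j: break; prime[i*j] = False'
def markJ (n i : Int) (js : List Int) (prime : List Bool) : List Bool :=
  match js with
  | [] => prime
  | j :: rest =>
      if n ≤ i * j then prime
      else markJ n i rest (PySem.List.pySetD prime (i * j) false)

def solution (n : Int) : List Int :=
  let prime := (PySem.List.pyRange 0 n 1).map (fun _ => true)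
  let prime := (PySem.List.pyRange 2 10 1).foldl
      (fun p i => markJ n i (PySem.List.pyRange 2 n 1) p) prime
  (PySem.List.pyRange 2 n 1).foldl
      (fun acc i => if PySem.List.pyGetD prime i false then acc ++ [i] else acc) []

-- ===== PORT B =====
def solution_alt (n : Int) : List Int :=
  (PySem.List.pyRange 2 n 1).filter (fun m =>
    !((PySem.List.pyRange 2 10 1).any (fun i => PySem.Int.mod m i == 0 && decide (i < m))))

-- ===== PRECONDITION & SPEC =====
def Spec_solution (n : Int) (out : List Int) : Prop := out = solution_alt n
instance (n : Int) (out : List Int) : Decidable (Spec_solution n out) := by unfold Spec_solution; infer_instance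

-- ===== CLAIM (what is proved, stated in full; the proofs are below) =====
def Claim_equal_solution : Prop := ∀ (n : Int), Dom_solution n → Spec_solution n (solution n)

-- ===== LEMMAS AND PROOFS =====

theorem markJ_length (n i : Int) (js : List Int) (p : List Bool) :
    (markJ n i js p).length = p.length := by
  induction js generalizing p with
  | nil => rfl
  | cons j rest ih =>
      simp only [markJ]
      split
      · rfl
      · rw [ih]; simp [PySem.List.length_pySetD]

theorem markJ_getD (n i : Int) (hi : 2 ≤ i) (k : Nat) (hk : (k : Int) < n) :
    ∀ (fuel : Nat) (a : Int) (p : List Bool), 2 ≤ a → (n - a).toNat = fuel →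
      k < p.length →
      (markJ n i (PySem.List.pyRange a n 1) p).getD k false
        = (p.getD k false && !decide (i ∣ (k : Int) ∧ a * i ≤ (k : Int))) := by
  intro fuel
  induction fuel with
  | zero =>
      intro a p ha hfuel hlen
      rw [PySem.List.pyRange_one_eq_nil (by omega : n ≤ a)]
      have hno : ¬ (i ∣ (k : Int) ∧ a * i ≤ (k : Int)) := by
        rintro ⟨_, h2⟩
        have h1 : a * 1 ≤ a * i := by
          apply mul_le_mul_of_nonneg_left (by omega) (by omega)
        have h2' : a * 1 = a := by ring
        omega
      simp [markJ, hno]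
  | succ f ih =>
      intro a p ha hfuel hlen
      have han : a < n := by omega
      rw [PySem.List.pyRange_one_cons han]
      simp only [markJ]
      by_cases hbr : n ≤ i * a
      · have hno : ¬ (i ∣ (k : Int) ∧ a * i ≤ (k : Int)) := by
          rintro ⟨_, h2⟩
          have hcomm : a * i = i * a := mul_comm a i
          omega
        simp [hbr, hno]
      · simp only [if_neg hbr]
        have hia : (0:Int) ≤ i * a := by positivity
        rw [PySem.List.pySetD_of_nonneg _ _ hia,
            ih (a + 1) _ (by omega) (by omega) (by simpa using hlen)]
        by_cases hek : (k : Int) = i * a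
        · have hkn : (i * a).toNat = k := by omega
          have hset : ((p.set (i * a).toNat false).getD k false) = false := by
            rw [List.getD_eq_getElem?_getD, List.getElem?_set, if_pos hkn,
                if_pos (hkn ▸ hlen)]
            rfl
          have hyes : (i ∣ (k : Int) ∧ a * i ≤ (k : Int)) :=
            ⟨⟨a, hek⟩, le_of_eq (by rw [hek]; ring)⟩
          rw [hset]
          simp [hyes]
        · have hkn : (i * a).toNat ≠ k := by omega
          have hset : ((p.set (i * a).toNat false).getD k false) = p.getD k false := by
            rw [List.getD_eq_getElem?_getD, List.getElem?_set, if_neg hkn,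
                ← List.getD_eq_getElem?_getD]
          rw [hset]
          have hiff : (i ∣ (k : Int) ∧ (a + 1) * i ≤ (k : Int)) ↔
              (i ∣ (k : Int) ∧ a * i ≤ (k : Int)) := by
            constructor
            · rintro ⟨hd, h2⟩
              refine ⟨hd, ?_⟩
              have h1 : a * i ≤ (a + 1) * i := by
                apply mul_le_mul_of_nonneg_right (by omega) (by omega)
              omega
            · rintro ⟨hd, h2⟩
              refine ⟨hd, ?_⟩
              rcases hd with ⟨c, hc⟩
              have h1 : i * a ≤ i * c := by
                have hcomm : a * i = i * a := mul_comm a i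
                omega
              have hca : a ≤ c := le_of_mul_le_mul_left h1 (by omega)
              have hca' : a + 1 ≤ c := by
                rcases lt_or_eq_of_le hca with h | h
                · omega
                · exact absurd (by rw [hc, ← h]) hek
              have h2' : (a + 1) * i ≤ c * i := by
                apply mul_le_mul_of_nonneg_right hca' (by omega)
              have hcomm : c * i = i * c := mul_comm c i
              omega
          simp [hiff]

theorem foldl_markJ_getD (n : Int) (k : Nat) (hk : (k : Int) < n) :
    ∀ (is : List Int) (p : List Bool), (∀ i ∈ is, 2 ≤ i) → k < p.length →
      (is.foldl (fun p i => markJ n i (PySem.List.pyRange 2 n 1) p) p).getD k false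
        = (p.getD k false && !(is.any (fun i => decide (i ∣ (k : Int) ∧ 2 * i ≤ (k : Int))))) := by
  intro is
  induction is with
  | nil => simp
  | cons i rest ih =>
      intro p his hlen
      simp only [List.foldl_cons, List.any_cons]
      rw [ih _ (fun j hj => his j (by simp [hj])) (by rw [markJ_length]; exact hlen)]
      rw [markJ_getD n i (his i (by simp)) k hk (n - 2).toNat 2 p (le_refl 2) rfl hlen]
      simp [Bool.not_or, Bool.and_assoc]

theorem pred_eq (i m : Int) (hi : 2 ≤ i) (_hm : 2 ≤ m) :
    (PySem.Int.mod m i == 0 && decide (i < m)) = decide (i ∣ m ∧ 2 * i ≤ m) := by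
  have hmod : PySem.Int.mod m i = m % i := by
    unfold PySem.Int.mod
    rw [Int.fmod_eq_emod]
    simp [show (0:Int) ≤ i by omega]
  rw [hmod]
  by_cases hd : i ∣ m
  · have h0 : m % i = 0 := Int.dvd_iff_emod_eq_zero.mp hd
    have hiff : i < m ↔ 2 * i ≤ m := by
      rcases hd with ⟨c, hc⟩
      constructor
      · intro him
        by_cases hc2 : 2 ≤ c
        · have h1 : i * 2 ≤ i * c := mul_le_mul_of_nonneg_left hc2 (by omega)
          omega
        · have h1 : i * c ≤ i * 1 := mul_le_mul_of_nonneg_left (by omega) (by omega)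
          have h2 : i * 1 = i := by ring
          omega
      · intro h2; omega
    simp [h0, hiff, hd]
  · have h0 : ¬ (m % i = 0) := fun h => hd (Int.dvd_iff_emod_eq_zero.mpr h)
    simp [h0, hd]

theorem final_getD (n m : Int) (h2 : 2 ≤ m) (hn : m < n) :
    PySem.List.pyGetD
      ((PySem.List.pyRange 2 10 1).foldl
        (fun p i => markJ n i (PySem.List.pyRange 2 n 1) p)
        ((PySem.List.pyRange 0 n 1).map (fun _ => true))) m false
    = !((PySem.List.pyRange 2 10 1).any
        (fun i => PySem.Int.mod m i == 0 && decide (i < m))) := by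
  rw [PySem.List.pyGetD_of_nonneg _ _ (by omega : (0:Int) ≤ m)]
  have hk : (m.toNat : Int) = m := by omega
  have hlen : m.toNat < ((PySem.List.pyRange 0 n 1).map (fun _ => true) : List Bool).length := by
    simp [PySem.List.length_pyRange_one]
    omega
  rw [foldl_markJ_getD n m.toNat (by omega)
      (PySem.List.pyRange 2 10 1) _
      (fun i hi => (PySem.List.mem_pyRange_one.mp hi).1) hlen]
  have hinit : ((PySem.List.pyRange 0 n 1).map (fun _ => true) : List Bool).getD m.toNat false = true := by
    rw [List.map_const', List.getD_replicate]
    simpa using hlen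
  rw [hinit, hk]
  have hrange : PySem.List.pyRange 2 10 1 = [2, 3, 4, 5, 6, 7, 8, 9] := by decide
  rw [hrange]
  simp only [List.any_cons, List.any_nil]
  rw [pred_eq 2 m (by norm_num) h2, pred_eq 3 m (by norm_num) h2,
      pred_eq 4 m (by norm_num) h2, pred_eq 5 m (by norm_num) h2,
      pred_eq 6 m (by norm_num) h2, pred_eq 7 m (by norm_num) h2,
      pred_eq 8 m (by norm_num) h2, pred_eq 9 m (by norm_num) h2]
  simp

theorem solution_spec : Claim_equal_solution := by
  unfold Claim_equal_solution
  intro n _hdom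
  unfold Spec_solution solution solution_alt
  simp only [PySem.List.foldl_append_if_eq_filter, List.nil_append]
  apply List.filter_congr
  intro m hm
  rcases PySem.List.mem_pyRange_one.mp hm with ⟨h2, hn⟩
  exact final_getD n m h2 hn
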